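-- pv_equiv track=rewrite | github.com/DIGIT-X-Lab/MOSAICX | mosaicx/source_mapping.py | _build_phi_summary
-- ===== SOURCE A (Python) =====
-- from typing import Any
--
-- def _build_phi_summary(phi_items: list[dict[str, Any]]) -> str:
--     """Build a one-line summary of detected PHI items."""
--     from collections import Counter
--
--     counts = Counter(item.get("type", "OTHER") for item in phi_items)
--     parts = []
--     for phi_type in sorted(counts):
--         n = counts[phi_type]
--         label = phi_type.lower() + ("s" if n > 1 else "")
--         parts.append(f"{n} {label}")
--     total = len(phi_items)
--     return f"{total} PHI item{'s' if total != 1 else ''} redacted: {', '.join(parts)}"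
-- ===== SOURCE B (Python) =====
-- def _build_phi_summary(phi_items):
--     """Build a one-line summary of detected PHI items."""
--     from itertools import groupby
--
--     types = sorted(item.get("type", "OTHER") for item in phi_items)
--     parts = []
--     for phi_type, group in groupby(types):
--         n = sum(1 for _ in group)
--         parts.append(f"{n} {phi_type.lower() + ('s' if n > 1 else '')}")
--     total = len(phi_items)
--     return f"{total} PHI item{'s' if total != 1 else ''} redacted: {', '.join(parts)}"
-- ===== Notes on version B (the rewrite author's own statement) =====
-- stated objective: alternative
-- what changed: Replaced the Counter-then-sorted-keys pass with a sort-then-groupby pass: B sorts the raw type list and walks consecutive equal runs with itertools.groupby, taking each count as the run length, so no counting dictionary is built.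
import Mathlib
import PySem

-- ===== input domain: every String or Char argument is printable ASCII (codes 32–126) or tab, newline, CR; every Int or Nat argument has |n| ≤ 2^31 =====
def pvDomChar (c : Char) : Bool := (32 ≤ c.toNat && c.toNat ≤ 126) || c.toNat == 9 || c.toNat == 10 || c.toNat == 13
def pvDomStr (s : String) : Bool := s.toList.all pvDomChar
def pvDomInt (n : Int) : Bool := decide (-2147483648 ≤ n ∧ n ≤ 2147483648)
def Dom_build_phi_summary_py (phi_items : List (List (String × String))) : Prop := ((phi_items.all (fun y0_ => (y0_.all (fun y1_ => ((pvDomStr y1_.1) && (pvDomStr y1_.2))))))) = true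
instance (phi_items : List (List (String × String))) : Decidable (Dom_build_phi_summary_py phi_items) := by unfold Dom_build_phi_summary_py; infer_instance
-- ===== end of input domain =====

-- B replaces A's Counter + sorted-keys pass by sorting the type list and grouping
-- consecutive equal runs (itertools.groupby); same output, an alternative decomposition.

-- shared helper: item.get("type", "OTHER")
def pvGetType (item : List (String × String)) : String :=
  PySem.Dict.getD (PySem.Dict.ofList item) "type" "OTHER"

-- ===== PORT A =====
def build_phi_summary_py (phi_items : List (List (String × String))) : String :=
  let counts := PySem.Dict.counter (phi_items.map (fun item => pvGetType item))
  let parts := (PySem.List.sorted counts.keys (fun k => k)).foldl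
    (fun parts phi_type =>
      let n := counts.getD phi_type 0
      let label := PySem.Str.lower phi_type ++ (if n > 1 then "s" else "")
      parts ++ [PySem.Int.toStr n ++ " " ++ label]) []
  let total : Int := phi_items.length
  PySem.Int.toStr total ++ " PHI item" ++ (if total ≠ 1 then "s" else "") ++
    " redacted: " ++ PySem.Str.join ", " parts

-- ===== PORT B =====
-- itertools.groupby over a list: each run yields (value, run length);
-- the recursive call continues past the current run.
def pvRuns : List String → List (String × Int)
  | [] => []
  | x :: xs =>
    (x, ((xs.takeWhile (fun y => y == x)).length : Int) + 1) ::
      pvRuns (xs.dropWhile (fun y => y == x))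
termination_by l => l.length
decreasing_by
  have := List.length_dropWhile_le (p := fun y => y == x) (l := xs)
  simp; omega

def build_phi_summary_py_alt (phi_items : List (List (String × String))) : String :=
  let types := PySem.List.sorted (phi_items.map (fun item => pvGetType item)) (fun k => k)
  let parts := (pvRuns types).map (fun p =>
    PySem.Int.toStr p.2 ++ " " ++
      (PySem.Str.lower p.1 ++ (if p.2 > 1 then "s" else "")))
  let total : Int := phi_items.length
  PySem.Int.toStr total ++ " PHI item" ++ (if total ≠ 1 then "s" else "") ++
    " redacted: " ++ PySem.Str.join ", " parts

-- ===== PRECONDITION & SPEC =====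
def Spec_build_phi_summary_py (phi_items : List (List (String × String))) (out : String) : Prop := out = build_phi_summary_py_alt phi_items
instance (phi_items : List (List (String × String))) (out : String) : Decidable (Spec_build_phi_summary_py phi_items out) := by unfold Spec_build_phi_summary_py; infer_instance

-- ===== CLAIM (what is proved, stated in full; the proofs are below) =====
def Claim_equal_build_phi_summary_py : Prop := ∀ (phi_items : List (List (String × String))), Dom_build_phi_summary_py phi_items → Spec_build_phi_summary_py phi_items (build_phi_summary_py phi_items)

-- ===== LEMMAS AND PROOFS =====

theorem pv_not_mem_dropWhile (x : String) (xs : List String)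
    (hx : ∀ y ∈ xs, x ≤ y) (hp : xs.Pairwise (· ≤ ·)) :
    x ∉ xs.dropWhile (fun y => y == x) := by
  intro hmem
  have hne : xs.dropWhile (fun y => y == x) ≠ [] := List.ne_nil_of_mem hmem
  obtain ⟨hd, tl, heq⟩ := List.exists_cons_of_ne_nil hne
  have hhd : (hd == x) = false := by
    have h2 := List.head_dropWhile_not (fun y => y == x) hne
    rw [show ((List.dropWhile (fun y => y == x) xs).head hne) = hd from by simp [heq]] at h2
    exact h2
  simp at hhd
  have hdmem : hd ∈ xs := (List.dropWhile_sublist _).mem (heq ▸ List.mem_cons_self)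
  have h1 : x ≤ hd := hx hd hdmem
  have hpd : (xs.dropWhile (fun y => y == x)).Pairwise (· ≤ ·) :=
    hp.sublist (List.dropWhile_sublist _)
  rw [heq] at hpd hmem
  rcases List.mem_cons.mp hmem with h | h
  · exact hhd h.symm
  · exact hhd (le_antisymm ((List.pairwise_cons.mp hpd).1 x h) h1)

theorem pvRuns_sorted_chain (l : List String) (h : l.Pairwise (· ≤ ·)) :
    pvRuns l = (PySem.List.sorted (PySem.Set.ofList l) (fun k => k)).map
      (fun k => (k, (l.count k : Int))) := by
  induction l using pvRuns.induct with
  | case1 => simp [pvRuns, PySem.Set.ofList, PySem.List.sorted]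
  | case2 x xs ih =>
    rw [List.pairwise_cons] at h
    obtain ⟨hx, hp⟩ := h
    set t := xs.takeWhile (fun y => y == x) with ht
    set d := xs.dropWhile (fun y => y == x) with hd
    have hxd : x ∉ d := pv_not_mem_dropWhile x xs hx hp
    have hsplit : t ++ d = xs := List.takeWhile_append_dropWhile
    have htall : ∀ y ∈ t, y = x := by
      intro y hy
      have h2 := List.mem_takeWhile_imp (p := fun y => y == x) (l := xs) (x := y) (ht ▸ hy)
      exact eq_of_beq h2
    have hlt : ∀ y ∈ d, x < y := by
      intro y hy
      have hmem : y ∈ xs := (List.dropWhile_sublist _).mem hy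
      rcases lt_or_eq_of_le (hx y hmem) with hlt | heq
      · exact hlt
      · exact absurd (heq ▸ hy) hxd
    have hpd : d.Pairwise (· ≤ ·) := hp.sublist (List.dropWhile_sublist _)
    -- sorted set of x::xs = x :: sorted set of d
    have hsort : PySem.List.sorted (PySem.Set.ofList (x :: xs)) (fun k => k)
        = x :: PySem.List.sorted (PySem.Set.ofList d) (fun k => k) := by
      apply PySem.List.sorted_eq_of_perm_of_pairwise_lt
      · rw [List.perm_ext_iff_of_nodup ?_ (PySem.Set.nodup_ofList _)]
        · intro a
          simp only [PySem.Set.mem_ofList, List.mem_cons, PySem.List.mem_sorted]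
          constructor
          · rintro (rfl | hm)
            · left; rfl
            · right; rw [← hsplit]; exact List.mem_append_right _ hm
          · rintro (rfl | hm)
            · left; rfl
            · rw [← hsplit] at hm
              rcases List.mem_append.mp hm with hm | hm
              · left; exact htall a hm
              · right; exact hm
        · refine List.nodup_cons.mpr ⟨?_, ?_⟩
          · rw [PySem.List.mem_sorted, PySem.Set.mem_ofList]; exact hxd
          · exact ((PySem.List.sorted_perm _ _ _).nodup_iff).mpr (PySem.Set.nodup_ofList _)
      · refine List.pairwise_cons.mpr ⟨?_, PySem.List.sorted_ofList_pairwise_lt d⟩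
        intro z hz
        rw [PySem.List.mem_sorted, PySem.Set.mem_ofList] at hz
        exact hlt z hz
    -- counts
    have hcx : (x :: xs).count x = t.length + 1 := by
      rw [← hsplit]
      simp [List.count_append, List.count_eq_zero.mpr hxd,
        List.count_eq_length.mpr (fun b hb => (htall b hb).symm)]
    have hck : ∀ k ∈ d, (x :: xs).count k = d.count k := by
      intro k hk
      have hkx : k ≠ x := fun hkx => hxd (hkx ▸ hk)
      rw [← hsplit]
      simp [List.count_append, Ne.symm hkx,
        List.count_eq_zero.mpr (fun hm => hkx (htall k hm))]
    rw [pvRuns, hsort, List.map_cons, ← hd, ← ht, ih hpd]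
    congr 1
    · rw [hcx]; push_cast; ring_nf
    · apply List.map_congr_left
      intro k hk
      rw [PySem.List.mem_sorted, PySem.Set.mem_ofList] at hk
      rw [hck k hk]

theorem pvRuns_sorted (ts : List String) :
    pvRuns (PySem.List.sorted ts (fun k => k)) =
      (PySem.List.sorted (PySem.Set.ofList ts) (fun k => k)).map
        (fun k => (k, (ts.count k : Int))) := by
  have hperm := PySem.List.sorted_perm ts (fun k => k) false
  rw [pvRuns_sorted_chain _ (PySem.List.sorted_pairwise ts (fun k => k))]
  have h1 : (PySem.List.sorted (PySem.Set.ofList (PySem.List.sorted ts (fun k => k))) (fun k => k))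
      = PySem.List.sorted (PySem.Set.ofList ts) (fun k => k) := by
    apply PySem.List.sorted_eq_sorted_of_perm _ _ _ (fun a b hab => hab)
    rw [List.perm_ext_iff_of_nodup (PySem.Set.nodup_ofList _) (PySem.Set.nodup_ofList _)]
    intro a
    simp only [PySem.Set.mem_ofList, PySem.List.mem_sorted]
  rw [h1]
  apply List.map_congr_left
  intro k _
  rw [hperm.count_eq]

-- ===== VERDICT (by name: the statement is the Claim_ definition above) =====
theorem build_phi_summary_py_spec : Claim_equal_build_phi_summary_py := by
  intro phi_items _
  unfold Spec_build_phi_summary_py build_phi_summary_py build_phi_summary_py_alt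
  simp only [PySem.Dict.keys_counter, PySem.List.foldl_append_singleton_eq_map,
    PySem.Dict.getD_counter, List.nil_append, pvRuns_sorted, List.map_map]
  rfl
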